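-- pv_equiv track=rewrite | github.com/weixinn/112termproject | ProjectCodebase/VersionControl/v3.py | isLegalBoard
-- ===== SOURCE A (Python) =====
-- def isLegalBoard(board):
--     if board == []:
--         return False
--
--     maxRow, maxCol = len(board)-1, len(board[0])-1
--     directions = [(0,-1),(0,1),(-1,0),(1,0)] # up, down, left, right
--     # dictionary of each position on the board and whether or not it has a valid way out
--     visited = {}
--
--     # for a given board and row & col, check that there is always a way out
--     # of any blank spots so there are no isolated "pockets" that cannot be accessed
--     def pathExists(board, row, col):
--         seen = set()
--
--         def solve(board, row, col, depth = 0):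
--             if (row,col) in visited:
--                 solution = visited[(row,col)]
--                 return solution
--
--             elif (row,col) in seen:
--                 return False
--
--             elif row == 0 or col == 0 or row==maxRow or col == maxCol:
--                 return True
--
--             else:
--                 seen.add((row,col))
--                 for move in directions:
--                     dCol, dRow = move
--                     newRow = row + dRow
--                     newCol = col + dCol
--
--                     if board[newRow][newCol] == 0:
--                         solution = solve(board, newRow, newCol, depth +1)
--                         if solution == True:
--                             return solution
--                 return False
--
--         result = solve(board, row, col)
--         visited[(row,col)] = result
--         return result
--
--     for row in range (len(board)):
--         for col in range (len(board[0])):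
--             if board[row][col] == 0:
--                 if pathExists(board, row, col) != True:
--                     return False
--     return True
-- ===== SOURCE B (Python) =====
-- def isLegalBoard(board):
--     # Alternative algorithm: one multi-source flood fill (collect all border blank cells, spread through
--     # blank neighbours with an explicit stack), then check every blank cell was reached.
--     if board == []:
--         return False
--     h, w = len(board), len(board[0])
--     reached = set()
--     stack = []
--     for r in range(h):
--         for c in range(w):
--             if (r == 0 or c == 0 or r == h - 1 or c == w - 1) and board[r][c] == 0:
--                 reached.add((r, c))
--                 stack.append((r, c))
--     while stack:
--         r, c = stack.pop()
--         for nr, nc in ((r - 1, c), (r + 1, c), (r, c - 1), (r, c + 1)):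
--             if 0 <= nr < h and 0 <= nc < w and board[nr][nc] == 0 and (nr, nc) not in reached:
--                 reached.add((nr, nc))
--                 stack.append((nr, nc))
--     return all(board[r][c] != 0 or (r, c) in reached
--                for r in range(h) for c in range(w))
-- ===== Notes on version B (the rewrite author's own statement) =====
-- stated objective: alternative
-- what changed: Replaced the per-cell memoized recursive DFS (one search started from every blank cell) by a single multi-source iterative flood fill from the border blank cells followed by one membership scan.
-- outside the precondition, e.g. on isLegalBoard([[1, 1, 1], [1, 0, 1], [1, 1, 1], [1, 1]]): A returns False, B raises IndexError
import Mathlib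
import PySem

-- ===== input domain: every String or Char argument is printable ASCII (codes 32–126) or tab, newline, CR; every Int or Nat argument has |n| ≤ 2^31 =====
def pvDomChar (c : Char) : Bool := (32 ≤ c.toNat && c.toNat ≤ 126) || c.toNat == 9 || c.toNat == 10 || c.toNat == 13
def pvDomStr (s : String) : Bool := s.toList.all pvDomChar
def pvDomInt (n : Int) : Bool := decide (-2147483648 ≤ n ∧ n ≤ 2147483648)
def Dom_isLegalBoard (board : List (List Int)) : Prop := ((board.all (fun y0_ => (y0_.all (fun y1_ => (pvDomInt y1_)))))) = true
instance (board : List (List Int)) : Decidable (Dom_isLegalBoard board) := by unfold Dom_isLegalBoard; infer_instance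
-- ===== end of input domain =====

-- B replaces A's per-cell memoized recursive DFS by one multi-source iterative flood fill
-- from the border blank cells (objective: alternative). Equality of the RETURN value is proved.

-- shared cell access: board[r][c] == 0, total via getD (under Pre_ every access A/B makes is in range)
def pvAt0 (board : List (List Int)) (r c : Nat) : Bool := ((board.getD r []).getD c 1) == 0

-- ===== PORT A =====
-- inner `solve`: fuel-guarded transliteration of the recursive search; `visited` is the
-- memo dict (read-only inside one search), `seen` the mutable set threaded through;
-- the four moves are unrolled in A's direction order (up, down, left, right rows),
-- each step skipped once a True result was found (Python's early return).
def pvSolveA (board : List (List Int)) (maxRow maxCol : Nat)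
    (visited : PySem.Dict (Nat × Nat) Bool) :
    Nat → PySem.Set (Nat × Nat) → Nat → Nat → Bool × PySem.Set (Nat × Nat)
  | 0, seen, _, _ => (false, seen)
  | fuel+1, seen, r, c =>
    match PySem.Dict.get? visited (r, c) with
    | some b => (b, seen)
    | none =>
      if PySem.Set.contains seen (r, c) then (false, seen)
      else if r = 0 ∨ c = 0 ∨ r = maxRow ∨ c = maxCol then (true, seen)
      else
        -- the for-loop over the four moves, with Python's early `return True`
        -- carried as the Bool flag (once true, the remaining moves are skipped)
        [(r-1, c), (r+1, c), (r, c-1), (r, c+1)].foldl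
          (fun s q =>
            if s.1 then s
            else if pvAt0 board q.1 q.2 then pvSolveA board maxRow maxCol visited fuel s.2 q.1 q.2
            else s)
          (false, PySem.Set.add seen (r, c))

-- `pathExists`: run solve with a fresh `seen`, then store the result in `visited`
def pvPathExistsA (board : List (List Int)) (maxRow maxCol fuel : Nat)
    (visited : PySem.Dict (Nat × Nat) Bool) (r c : Nat) :
    Bool × PySem.Dict (Nat × Nat) Bool :=
  match pvSolveA board maxRow maxCol visited fuel PySem.Set.empty r c with
  | (res, _) => (res, PySem.Dict.insert visited (r, c) res)

-- the main double loop, threading `visited`; `none` = Python's early `return False`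
def pvScanColsA (board : List (List Int)) (maxRow maxCol fuel r : Nat) :
    List Nat → PySem.Dict (Nat × Nat) Bool → Option (PySem.Dict (Nat × Nat) Bool)
  | [], v => some v
  | c :: cs, v =>
    if pvAt0 board r c then
      match pvPathExistsA board maxRow maxCol fuel v r c with
      | (res, v') => if res then pvScanColsA board maxRow maxCol fuel r cs v' else none
    else pvScanColsA board maxRow maxCol fuel r cs v

def pvScanRowsA (board : List (List Int)) (maxRow maxCol fuel w : Nat) :
    List Nat → PySem.Dict (Nat × Nat) Bool → Bool
  | [], _ => true
  | r :: rs, v =>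
    match pvScanColsA board maxRow maxCol fuel r (List.range w) v with
    | none => false
    | some v' => pvScanRowsA board maxRow maxCol fuel w rs v'

def isLegalBoard (board : List (List Int)) : Bool :=
  if board = [] then false
  else
    let h := board.length
    let w := (board.headD []).length
    pvScanRowsA board (h-1) (w-1) (h*w+1) w (List.range h) PySem.Dict.empty

-- ===== PORT B =====
-- B: multi-source flood fill.  The Python stack's END (append/pop side) is the HEAD of the
-- Lean list, so push = cons and pop = head — the same LIFO order.  Coordinates are Nats;
-- the Bool in a neighbour triple is Python's `0 <= nr` (resp. `0 <= nc`) test, precomputed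
-- because Nat subtraction truncates.
def pvBStep (board : List (List Int)) (h w : Nat)
    (st : PySem.Set (Nat × Nat) × List (Nat × Nat)) (n : Nat × Nat × Bool) :
    PySem.Set (Nat × Nat) × List (Nat × Nat) :=
  if n.2.2 && decide (n.1 < h) && decide (n.2.1 < w) && pvAt0 board n.1 n.2.1
      && !(PySem.Set.contains st.1 (n.1, n.2.1))
  then (PySem.Set.add st.1 (n.1, n.2.1), (n.1, n.2.1) :: st.2) else st

def pvNbrs (r c : Nat) : List (Nat × Nat × Bool) :=
  [(r-1, c, decide (1 ≤ r)), (r+1, c, true), (r, c-1, decide (1 ≤ c)), (r, c+1, true)]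

def pvFloodB (board : List (List Int)) (h w : Nat) :
    Nat → List (Nat × Nat) → PySem.Set (Nat × Nat) → PySem.Set (Nat × Nat)
  | 0, _, reached => reached
  | _+1, [], reached => reached
  | fuel+1, p :: rest, reached =>
    let st := (pvNbrs p.1 p.2).foldl (pvBStep board h w) (reached, rest)
    pvFloodB board h w fuel st.2 st.1

def pvAddSourceB (board : List (List Int)) (h w : Nat)
    (st : PySem.Set (Nat × Nat) × List (Nat × Nat)) (p : Nat × Nat) :
    PySem.Set (Nat × Nat) × List (Nat × Nat) :=
  if (p.1 = 0 ∨ p.2 = 0 ∨ p.1 = h-1 ∨ p.2 = w-1) ∧ pvAt0 board p.1 p.2 = true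
  then (PySem.Set.add st.1 p, p :: st.2) else st

def pvCells (h w : Nat) : List (Nat × Nat) :=
  (List.range h).flatMap (fun r => (List.range w).map (fun c => (r, c)))

def isLegalBoard_alt (board : List (List Int)) : Bool :=
  if board = [] then false
  else
    let h := board.length
    let w := (board.headD []).length
    let st := (pvCells h w).foldl (pvAddSourceB board h w) (PySem.Set.empty, [])
    let reached := pvFloodB board h w (2*h*w+1) st.2 st.1
    (pvCells h w).all (fun p => !(pvAt0 board p.1 p.2) || PySem.Set.contains reached p)

-- ===== PRECONDITION & SPEC =====
-- Pre_ excludes ragged boards in which some row is shorter than the first row: there A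
-- indexes past that row's end and raises IndexError (except when an isolated pocket in
-- earlier rows makes it return False first), and B raises likewise or earlier.
def Pre_isLegalBoard (board : List (List Int)) : Prop :=
  ∀ row ∈ board, (board.headD []).length ≤ row.length
instance (board : List (List Int)) : Decidable (Pre_isLegalBoard board) := by
  unfold Pre_isLegalBoard; infer_instance

def pvWitness_isLegalBoard : List (List Int) := [[0, 0], [0, 0]]

def Spec_isLegalBoard (board : List (List Int)) (out : Bool) : Prop := out = isLegalBoard_alt board
instance (board : List (List Int)) (out : Bool) : Decidable (Spec_isLegalBoard board out) := by unfold Spec_isLegalBoard; infer_instance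

-- ===== CLAIM (what is proved, stated in full; the proofs are below) =====
def Claim_equal_isLegalBoard : Prop := ∀ (board : List (List Int)), Dom_isLegalBoard board → Pre_isLegalBoard board → Spec_isLegalBoard board (isLegalBoard board)

-- ===== LEMMAS AND PROOFS =====

-- "(r,c) is a blank cell connected, through blank cells, to a blank border cell"
inductive pvEsc (board : List (List Int)) (h w : Nat) : Nat → Nat → Prop
  | base (r c : Nat) : r < h → c < w → pvAt0 board r c = true →
      (r = 0 ∨ c = 0 ∨ r = h-1 ∨ c = w-1) → pvEsc board h w r c
  | up (r c : Nat) : r < h → c < w → pvAt0 board r c = true → 1 ≤ r →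
      pvEsc board h w (r-1) c → pvEsc board h w r c
  | down (r c : Nat) : r < h → c < w → pvAt0 board r c = true →
      pvEsc board h w (r+1) c → pvEsc board h w r c
  | left (r c : Nat) : r < h → c < w → pvAt0 board r c = true → 1 ≤ c →
      pvEsc board h w r (c-1) → pvEsc board h w r c
  | right (r c : Nat) : r < h → c < w → pvAt0 board r c = true →
      pvEsc board h w r (c+1) → pvEsc board h w r c

lemma pvEsc_facts {board : List (List Int)} {h w r c : Nat} (he : pvEsc board h w r c) :
    r < h ∧ c < w ∧ pvAt0 board r c = true := by
  cases he <;> exact ⟨by assumption, by assumption, by assumption⟩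

-- coverage of a cell by a set S or a memo entry `false`
def pvCov (visited : PySem.Dict (Nat × Nat) Bool) (S : Nat → Nat → Prop) (r c : Nat) : Prop :=
  S r c ∨ PySem.Dict.get? visited (r, c) = some false

def pvClosedAt (board : List (List Int)) (h w : Nat) (visited : PySem.Dict (Nat × Nat) Bool)
    (S : Nat → Nat → Prop) (r c : Nat) : Prop :=
  (1 ≤ r → r-1 < h → c < w → pvAt0 board (r-1) c = true → pvCov visited S (r-1) c) ∧
  (r+1 < h → c < w → pvAt0 board (r+1) c = true → pvCov visited S (r+1) c) ∧
  (1 ≤ c → r < h → c-1 < w → pvAt0 board r (c-1) = true → pvCov visited S r (c-1)) ∧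
  (r < h → c+1 < w → pvAt0 board r (c+1) = true → pvCov visited S r (c+1))

lemma pvCov_mono {visited} {S S' : Nat → Nat → Prop} (hss : ∀ a b, S a b → S' a b)
    {r c : Nat} (hc : pvCov visited S r c) : pvCov visited S' r c := by
  rcases hc with hc | hc
  · exact Or.inl (hss _ _ hc)
  · exact Or.inr hc

lemma pvClosedAt_mono {board h w visited} {S S' : Nat → Nat → Prop}
    (hss : ∀ a b, S a b → S' a b) {r c : Nat}
    (hc : pvClosedAt board h w visited S r c) : pvClosedAt board h w visited S' r c := by
  obtain ⟨h1, h2, h3, h4⟩ := hc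
  exact ⟨fun a b x y => pvCov_mono hss (h1 a b x y),
         fun a b x => pvCov_mono hss (h2 a b x),
         fun a b x y => pvCov_mono hss (h3 a b x y),
         fun a b x => pvCov_mono hss (h4 a b x)⟩

-- a set of non-border cells each of whose blank in-grid neighbours is covered contains no escaping cell
lemma pvNoEsc (board : List (List Int)) (h w : Nat) (visited : PySem.Dict (Nat × Nat) Bool)
    (S : Nat → Nat → Prop)
    (hvc : ∀ r c, PySem.Dict.get? visited (r, c) = some false → ¬ pvEsc board h w r c)
    (hS : ∀ r c, S r c → ¬ (r = 0 ∨ c = 0 ∨ r = h-1 ∨ c = w-1))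
    (hCl : ∀ r c, S r c → pvClosedAt board h w visited S r c) :
    ∀ r c, pvEsc board h w r c → ¬ S r c := by
  intro r c hesc
  induction hesc with
  | base r c hr hc h0 hb => exact fun hS' => hS _ _ hS' hb
  | up r c hr hc h0 hr1 hsub ih =>
    intro hS'
    obtain ⟨b1, b2, b3⟩ := pvEsc_facts hsub
    rcases (hCl _ _ hS').1 hr1 b1 b2 b3 with hq | hq
    · exact ih hq
    · exact hvc _ _ hq hsub
  | down r c hr hc h0 hsub ih =>
    intro hS'
    obtain ⟨b1, b2, b3⟩ := pvEsc_facts hsub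
    rcases (hCl _ _ hS').2.1 b1 b2 b3 with hq | hq
    · exact ih hq
    · exact hvc _ _ hq hsub
  | left r c hr hc h0 hc1 hsub ih =>
    intro hS'
    obtain ⟨b1, b2, b3⟩ := pvEsc_facts hsub
    rcases (hCl _ _ hS').2.2.1 hc1 b1 b2 b3 with hq | hq
    · exact ih hq
    · exact hvc _ _ hq hsub
  | right r c hr hc h0 hsub ih =>
    intro hS'
    obtain ⟨b1, b2, b3⟩ := pvEsc_facts hsub
    rcases (hCl _ _ hS').2.2.2 b1 b2 b3 with hq | hq
    · exact ih hq
    · exact hvc _ _ hq hsub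

-- memo correctness
def pvVC (board : List (List Int)) (h w : Nat) (visited : PySem.Dict (Nat × Nat) Bool) : Prop :=
  ∀ p b, PySem.Dict.get? visited p = some b → (b = true ↔ pvEsc board h w p.1 p.2)

-- interior blank cells
def pvInt (board : List (List Int)) (h w : Nat) (p : Nat × Nat) : Prop :=
  p.1 < h ∧ p.2 < w ∧ pvAt0 board p.1 p.2 = true ∧
    ¬ (p.1 = 0 ∨ p.2 = 0 ∨ p.1 = h-1 ∨ p.2 = w-1)

def pvIntF (board : List (List Int)) (h w : Nat) : Finset (Nat × Nat) :=
  (Finset.range h ×ˢ Finset.range w).filter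
    (fun p => pvAt0 board p.1 p.2 = true ∧ ¬ (p.1 = 0 ∨ p.2 = 0 ∨ p.1 = h-1 ∨ p.2 = w-1))

lemma pvIntF_mem {board h w} {p : Nat × Nat} :
    p ∈ pvIntF board h w ↔ pvInt board h w p := by
  simp [pvIntF, Finset.mem_filter, Finset.mem_product, Finset.mem_range, pvInt]
  tauto

lemma pvIntF_card (board : List (List Int)) (h w : Nat) :
    (pvIntF board h w).card ≤ h * w := by
  calc (pvIntF board h w).card ≤ (Finset.range h ×ˢ Finset.range w).card :=
        Finset.card_le_card (Finset.filter_subset _ _)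
    _ = h * w := by simp [Finset.card_product]

lemma pvCardBound (h w : Nat) (l : List (Nat × Nat)) (hnd : l.Nodup)
    (hin : ∀ p ∈ l, p.1 < h ∧ p.2 < w) : l.length ≤ h * w := by
  have hsub : l.toFinset ⊆ Finset.range h ×ˢ Finset.range w := by
    intro p hp
    simp only [List.mem_toFinset] at hp
    simp [Finset.mem_product, Finset.mem_range]
    exact (hin p hp)
  have := Finset.card_le_card hsub
  rwa [List.toFinset_card_of_nodup hnd, Finset.card_product, Finset.card_range, Finset.card_range] at this

lemma pvSet_toFinset_add (s : PySem.Set (Nat × Nat)) (x : Nat × Nat) :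
    (PySem.Set.add s x).toFinset = insert x s.toFinset := by
  ext p
  simp [PySem.Set.mem_add]
  tauto

lemma pvSet_sub_add (s : PySem.Set (Nat × Nat)) (x : Nat × Nat) : s ⊆ PySem.Set.add s x :=
  fun y hy => (PySem.Set.mem_add s x y).mpr (Or.inl hy)

lemma pvNodupAdd (s : PySem.Set (Nat × Nat)) (x : Nat × Nat) (hn : s.Nodup) :
    (PySem.Set.add s x).Nodup := by
  rw [PySem.Set.add_eq_ite]
  split
  · exact hn
  · rename_i hx
    simp [List.nodup_append, hn]
    intro a b hab heq
    exact hx (heq ▸ hab)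

-- A-side machinery: the body of the move loop, named for the proofs
def pvTryA (board : List (List Int)) (mR mC : Nat) (vis : PySem.Dict (Nat × Nat) Bool)
    (n : Nat) (s : Bool × PySem.Set (Nat × Nat)) (q : Nat × Nat) : Bool × PySem.Set (Nat × Nat) :=
  if s.1 then s
  else if pvAt0 board q.1 q.2 then pvSolveA board mR mC vis n s.2 q.1 q.2
  else s

lemma pvSolveA_zero (board : List (List Int)) (mR mC : Nat) (vis : PySem.Dict (Nat × Nat) Bool)
    (seen : PySem.Set (Nat × Nat)) (r c : Nat) :
    pvSolveA board mR mC vis 0 seen r c = (false, seen) := rfl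

lemma pvSolveA_succ_vis (board : List (List Int)) (mR mC : Nat) (vis : PySem.Dict (Nat × Nat) Bool)
    (n : Nat) (seen : PySem.Set (Nat × Nat)) (r c : Nat) (b : Bool)
    (hv : PySem.Dict.get? vis (r, c) = some b) :
    pvSolveA board mR mC vis (n+1) seen r c = (b, seen) := by
  unfold pvSolveA; rw [hv]

lemma pvSolveA_succ_new (board : List (List Int)) (mR mC : Nat) (vis : PySem.Dict (Nat × Nat) Bool)
    (n : Nat) (seen : PySem.Set (Nat × Nat)) (r c : Nat)
    (hv : PySem.Dict.get? vis (r, c) = none) :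
    pvSolveA board mR mC vis (n+1) seen r c =
      (if PySem.Set.contains seen (r, c) then (false, seen)
       else if r = 0 ∨ c = 0 ∨ r = mR ∨ c = mC then (true, seen)
       else [(r-1, c), (r+1, c), (r, c-1), (r, c+1)].foldl (pvTryA board mR mC vis n)
              (false, PySem.Set.add seen (r, c))) := by
  unfold pvSolveA; rw [hv]; rfl

lemma foldl_tryA_of_true (board : List (List Int)) (mR mC : Nat)
    (vis : PySem.Dict (Nat × Nat) Bool) (n : Nat) :
    ∀ (L : List (Nat × Nat)) (s : Bool × PySem.Set (Nat × Nat)), s.1 = true →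
      L.foldl (pvTryA board mR mC vis n) s = s := by
  intro L
  induction L with
  | nil => intro s _; rfl
  | cons q L ih =>
    intro s hs
    rw [List.foldl_cons, show pvTryA board mR mC vis n s q = s by unfold pvTryA; rw [if_pos hs]]
    exact ih s hs

lemma foldl_tryA_true (board : List (List Int)) (mR mC : Nat)
    (vis : PySem.Dict (Nat × Nat) Bool) (n : Nat) :
    ∀ (L : List (Nat × Nat)) (s : Bool × PySem.Set (Nat × Nat)),
      (L.foldl (pvTryA board mR mC vis n) s).1 = true →
      s.1 = true ∨ ∃ q ∈ L, pvAt0 board q.1 q.2 = true ∧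
        ∃ s', (pvSolveA board mR mC vis n s' q.1 q.2).1 = true := by
  intro L
  induction L with
  | nil => intro s h; exact Or.inl h
  | cons q L ih =>
    intro s h
    rcases ih (pvTryA board mR mC vis n s q) h with h1 | ⟨q', hq', hat', s', hs'⟩
    · unfold pvTryA at h1
      split at h1
      · exact Or.inl h1
      · split at h1
        · rename_i hat
          exact Or.inr ⟨q, by simp, hat, s.2, h1⟩
        · exact Or.inl h1
    · exact Or.inr ⟨q', List.mem_cons_of_mem _ hq', hat', s', hs'⟩

lemma pvSolveA_sound (board : List (List Int)) (h w : Nat)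
    (vis : PySem.Dict (Nat × Nat) Bool) (hvc : pvVC board h w vis) :
    ∀ fuel seen r c, r < h → c < w → pvAt0 board r c = true →
      (pvSolveA board (h-1) (w-1) vis fuel seen r c).1 = true → pvEsc board h w r c := by
  intro fuel
  induction fuel with
  | zero => intro seen r c _ _ _ hres; rw [pvSolveA_zero] at hres; simp at hres
  | succ n ih =>
    intro seen r c hr hc hat hres
    cases hv : PySem.Dict.get? vis (r, c) with
    | some b =>
      rw [pvSolveA_succ_vis board (h-1) (w-1) vis n seen r c b hv] at hres
      exact (hvc (r, c) b hv).mp hres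
    | none =>
      rw [pvSolveA_succ_new board (h-1) (w-1) vis n seen r c hv] at hres
      by_cases hs : PySem.Set.contains seen (r, c) = true
      · rw [if_pos hs] at hres; simp at hres
      · rw [if_neg hs] at hres
        by_cases hbord : r = 0 ∨ c = 0 ∨ r = h - 1 ∨ c = w - 1
        · exact pvEsc.base r c hr hc hat hbord
        · rw [if_neg hbord] at hres
          rcases foldl_tryA_true board (h-1) (w-1) vis n _ _ hres with h1 | ⟨q, hq, hatq, s', hs'⟩
          · simp at h1
          · push Not at hbord
            obtain ⟨hb1, hb2, hb3, hb4⟩ := hbord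
            simp only [List.mem_cons, List.not_mem_nil, or_false] at hq
            rcases hq with rfl | rfl | rfl | rfl
            · exact pvEsc.up r c hr hc hat (by omega) (ih s' (r-1) c (by omega) hc hatq hs')
            · exact pvEsc.down r c hr hc hat (ih s' (r+1) c (by omega) hc hatq hs')
            · exact pvEsc.left r c hr hc hat (by omega) (ih s' r (c-1) hr (by omega) hatq hs')
            · exact pvEsc.right r c hr hc hat (ih s' r (c+1) hr (by omega) hatq hs')

lemma pvCard_mono (X : Finset (Nat × Nat)) {s t : List (Nat × Nat)} (hst : s ⊆ t) :
    (X \ t.toFinset).card ≤ (X \ s.toFinset).card := by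
  apply Finset.card_le_card
  apply Finset.sdiff_subset_sdiff (Finset.Subset.refl _)
  intro p hp
  rw [List.mem_toFinset] at *
  exact hst hp

lemma foldl_tryA_false (board : List (List Int)) (h w : Nat)
    (vis : PySem.Dict (Nat × Nat) Bool) (n : Nat)
    (hrec : ∀ seen r c,
        ((pvIntF board h w) \ seen.toFinset).card + 1 ≤ n →
        (∀ p ∈ seen, pvInt board h w p) →
        r < h → c < w → pvAt0 board r c = true →
        ∀ out, pvSolveA board (h-1) (w-1) vis n seen r c = out → out.1 = false →
        seen ⊆ out.2 ∧ pvCov vis (fun a b => (a, b) ∈ out.2) r c ∧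
        (∀ p ∈ out.2, p ∈ seen ∨ (pvInt board h w p ∧
           pvClosedAt board h w vis (fun a b => (a, b) ∈ out.2) p.1 p.2))) :
    ∀ (L : List (Nat × Nat)) (s : Bool × PySem.Set (Nat × Nat)),
      ((pvIntF board h w) \ s.2.toFinset).card + 1 ≤ n →
      (∀ p ∈ s.2, pvInt board h w p) →
      (∀ q ∈ L, q.1 < h ∧ q.2 < w) →
      (L.foldl (pvTryA board (h-1) (w-1) vis n) s).1 = false →
      s.2 ⊆ (L.foldl (pvTryA board (h-1) (w-1) vis n) s).2 ∧
      (∀ q ∈ L, pvAt0 board q.1 q.2 = true →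
         pvCov vis (fun a b => (a, b) ∈ (L.foldl (pvTryA board (h-1) (w-1) vis n) s).2) q.1 q.2) ∧
      (∀ p ∈ (L.foldl (pvTryA board (h-1) (w-1) vis n) s).2,
         p ∈ s.2 ∨ (pvInt board h w p ∧
           pvClosedAt board h w vis
             (fun a b => (a, b) ∈ (L.foldl (pvTryA board (h-1) (w-1) vis n) s).2) p.1 p.2)) := by
  intro L
  induction L with
  | nil =>
    intro s _ _ _ _
    exact ⟨fun _ hp => hp, by simp, fun p hp => Or.inl hp⟩
  | cons q L ih =>
    intro s hfuel hsI hq hres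
    by_cases hs1 : s.1 = true
    · rw [List.foldl_cons, show pvTryA board (h-1) (w-1) vis n s q = s by
          unfold pvTryA; rw [if_pos hs1],
        foldl_tryA_of_true board (h-1) (w-1) vis n L s hs1] at hres
      exact absurd hres (by simp [hs1])
    · by_cases hat : pvAt0 board q.1 q.2 = true
      · have h1 : pvTryA board (h-1) (w-1) vis n s q =
            pvSolveA board (h-1) (w-1) vis n s.2 q.1 q.2 := by
          unfold pvTryA; rw [if_neg hs1, if_pos hat]
        rw [List.foldl_cons, h1] at hres ⊢
        by_cases hsub : (pvSolveA board (h-1) (w-1) vis n s.2 q.1 q.2).1 = true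
        · rw [foldl_tryA_of_true board (h-1) (w-1) vis n L _ hsub] at hres
          exact absurd hres (by simp [hsub])
        · have hsubf : (pvSolveA board (h-1) (w-1) vis n s.2 q.1 q.2).1 = false := by
            cases hx : (pvSolveA board (h-1) (w-1) vis n s.2 q.1 q.2).1
            · rfl
            · exact absurd hx hsub
          obtain ⟨hqw1, hqw2⟩ := hq q (by simp)
          obtain ⟨msub, covq, cl⟩ := hrec s.2 q.1 q.2 hfuel hsI hqw1 hqw2 hat
            (pvSolveA board (h-1) (w-1) vis n s.2 q.1 q.2) rfl hsubf
          have hsI' : ∀ p ∈ (pvSolveA board (h-1) (w-1) vis n s.2 q.1 q.2).2,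
              pvInt board h w p := by
            intro p hp
            rcases cl p hp with hp' | ⟨hint, _⟩
            · exact hsI p hp'
            · exact hint
          have hfuel' : ((pvIntF board h w) \
              ((pvSolveA board (h-1) (w-1) vis n s.2 q.1 q.2).2).toFinset).card + 1 ≤ n := by
            have := pvCard_mono (pvIntF board h w) msub
            omega
          obtain ⟨sub2, Lcl, cl2⟩ := ih (pvSolveA board (h-1) (w-1) vis n s.2 q.1 q.2) hfuel' hsI'
            (fun q' hq' => hq q' (by simp [hq'])) hres
          refine ⟨List.Subset.trans msub sub2, ?_, ?_⟩
          · intro q' hq' hatq'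
            rcases List.mem_cons.mp hq' with rfl | hq'
            · exact pvCov_mono (fun a b hab => sub2 hab) covq
            · exact Lcl q' hq' hatq'
          · intro p hp
            rcases cl2 p hp with hp' | ⟨hint, hcl⟩
            · rcases cl p hp' with hp'' | ⟨hint, hcl⟩
              · exact Or.inl hp''
              · exact Or.inr ⟨hint, pvClosedAt_mono (fun a b hab => sub2 hab) hcl⟩
            · exact Or.inr ⟨hint, hcl⟩
      · have h1 : pvTryA board (h-1) (w-1) vis n s q = s := by
          unfold pvTryA; rw [if_neg hs1, if_neg hat]
        rw [List.foldl_cons, h1] at hres ⊢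
        obtain ⟨sub2, Lcl, cl2⟩ := ih s hfuel hsI (fun q' hq' => hq q' (by simp [hq'])) hres
        refine ⟨sub2, ?_, cl2⟩
        intro q' hq' hatq'
        rcases List.mem_cons.mp hq' with rfl | hq'
        · exact absurd hatq' hat
        · exact Lcl q' hq' hatq'

lemma pvSolveA_false (board : List (List Int)) (h w : Nat)
    (vis : PySem.Dict (Nat × Nat) Bool) :
    ∀ fuel seen r c,
      ((pvIntF board h w) \ seen.toFinset).card + 1 ≤ fuel →
      (∀ p ∈ seen, pvInt board h w p) →
      r < h → c < w → pvAt0 board r c = true →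
      ∀ out, pvSolveA board (h-1) (w-1) vis fuel seen r c = out → out.1 = false →
      seen ⊆ out.2 ∧
      pvCov vis (fun a b => (a, b) ∈ out.2) r c ∧
      (∀ p ∈ out.2, p ∈ seen ∨
        (pvInt board h w p ∧ pvClosedAt board h w vis (fun a b => (a, b) ∈ out.2) p.1 p.2)) := by
  intro fuel
  induction fuel with
  | zero => intro seen r c hfuel _ _ _ _ out _ _; exact absurd hfuel (by omega)
  | succ n ih =>
    intro seen r c hfuel hsI hr hc hat out hout hres
    subst hout
    cases hv : PySem.Dict.get? vis (r, c) with
    | some b =>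
      rw [pvSolveA_succ_vis board (h-1) (w-1) vis n seen r c b hv] at hres ⊢
      have hb : b = false := hres
      refine ⟨fun _ hp => hp, Or.inr ?_, fun p hp => Or.inl hp⟩
      rw [hv, hb]
    | none =>
      rw [pvSolveA_succ_new board (h-1) (w-1) vis n seen r c hv] at hres ⊢
      by_cases hs : PySem.Set.contains seen (r, c) = true
      · rw [if_pos hs] at hres ⊢
        exact ⟨fun _ hp => hp, Or.inl ((PySem.Set.contains_iff _ _).mp hs), fun p hp => Or.inl hp⟩
      · rw [if_neg hs] at hres ⊢
        by_cases hbord : r = 0 ∨ c = 0 ∨ r = h - 1 ∨ c = w - 1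
        · rw [if_pos hbord] at hres; simp at hres
        · rw [if_neg hbord] at hres ⊢
          have hrootint : pvInt board h w (r, c) := ⟨hr, hc, hat, hbord⟩
          have hrootnotin : (r, c) ∉ seen := fun hmem => hs ((PySem.Set.contains_iff _ _).mpr hmem)
          have hsI0 : ∀ p ∈ PySem.Set.add seen (r, c), pvInt board h w p := by
            intro p hp
            rcases (PySem.Set.mem_add _ _ _).mp hp with hp | rfl
            · exact hsI p hp
            · exact hrootint
          have hfuel0 : ((pvIntF board h w) \ (PySem.Set.add seen (r, c)).toFinset).card + 1 ≤ n := by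
            rw [pvSet_toFinset_add]
            have hmem : (r, c) ∈ (pvIntF board h w) \ seen.toFinset := by
              rw [Finset.mem_sdiff, pvIntF_mem]
              refine ⟨hrootint, ?_⟩
              rw [List.mem_toFinset]
              exact hrootnotin
            rw [Finset.sdiff_insert, Finset.card_erase_of_mem hmem]
            have hpos : 0 < ((pvIntF board h w) \ seen.toFinset).card :=
              Finset.card_pos.mpr ⟨(r, c), hmem⟩
            omega
          have hq4 : ∀ q ∈ [(r-1, c), (r+1, c), (r, c-1), (r, c+1)], q.1 < h ∧ q.2 < w := by
            push Not at hbord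
            obtain ⟨hb1, hb2, hb3, hb4⟩ := hbord
            intro q hq
            simp only [List.mem_cons, List.not_mem_nil, or_false] at hq
            rcases hq with rfl | rfl | rfl | rfl <;> refine ⟨?_, ?_⟩ <;> dsimp only <;> omega
          obtain ⟨sub2, Lcl, cl2⟩ := foldl_tryA_false board h w vis n ih
            [(r-1, c), (r+1, c), (r, c-1), (r, c+1)] (false, PySem.Set.add seen (r, c))
            hfuel0 hsI0 hq4 hres
          have hrootmem : (r, c) ∈
              ([(r-1, c), (r+1, c), (r, c-1), (r, c+1)].foldl (pvTryA board (h-1) (w-1) vis n)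
                (false, PySem.Set.add seen (r, c))).2 :=
            sub2 ((PySem.Set.mem_add _ _ _).mpr (Or.inr rfl))
          refine ⟨List.Subset.trans (pvSet_sub_add seen (r, c)) sub2, Or.inl hrootmem, ?_⟩
          intro p hp
          rcases cl2 p hp with hp' | ⟨hint, hcl⟩
          · rcases (PySem.Set.mem_add _ _ _).mp hp' with hp'' | rfl
            · exact Or.inl hp''
            · refine Or.inr ⟨hrootint, ?_, ?_, ?_, ?_⟩
              · intro _ _ _ hat'; exact Lcl (r-1, c) (by simp) hat'
              · intro _ _ hat'; exact Lcl (r+1, c) (by simp) hat'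
              · intro _ _ _ hat'; exact Lcl (r, c-1) (by simp) hat'
              · intro _ _ hat'; exact Lcl (r, c+1) (by simp) hat'
          · exact Or.inr ⟨hint, hcl⟩

lemma pvPathExistsA_spec (board : List (List Int)) (h w fuel : Nat)
    (vis : PySem.Dict (Nat × Nat) Bool) (hvc : pvVC board h w vis)
    (hfuel : (pvIntF board h w).card + 1 ≤ fuel)
    (r c : Nat) (hr : r < h) (hc : c < w) (hat : pvAt0 board r c = true) :
    ((pvPathExistsA board (h-1) (w-1) fuel vis r c).1 = true ↔ pvEsc board h w r c) ∧
      pvVC board h w (pvPathExistsA board (h-1) (w-1) fuel vis r c).2 := by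
  rcases hsv : pvSolveA board (h-1) (w-1) vis fuel PySem.Set.empty r c with ⟨res, sn⟩
  have hred : pvPathExistsA board (h-1) (w-1) fuel vis r c =
      (res, PySem.Dict.insert vis (r, c) res) := by
    unfold pvPathExistsA; rw [hsv]
  rw [hred]
  have hiff : (res = true) ↔ pvEsc board h w r c := by
    constructor
    · intro h1
      exact pvSolveA_sound board h w vis hvc fuel PySem.Set.empty r c hr hc hat
        (by rw [hsv]; exact h1)
    · intro hesc
      by_contra hne
      have hresf : res = false := by
        cases res
        · rfl
        · exact absurd rfl hne
      obtain ⟨msub, cov, cl⟩ := pvSolveA_false board h w vis fuel PySem.Set.empty r c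
        (by simpa using hfuel)
        (by intro p hp; simp [PySem.Set.empty] at hp)
        hr hc hat (res, sn) hsv hresf
      have hnS : ∀ a b, pvEsc board h w a b → ¬ ((a, b) ∈ sn) := by
        apply pvNoEsc board h w vis (fun a b => (a, b) ∈ sn)
        · intro a b hab hEsc
          have := (hvc (a, b) false hab).mpr hEsc
          simp at this
        · intro a b hab
          rcases cl (a, b) hab with hN | ⟨hint, _⟩
          · exact absurd hN (by simp [PySem.Set.empty])
          · exact hint.2.2.2
        · intro a b hab
          rcases cl (a, b) hab with hN | ⟨_, hcl⟩
          · exact absurd hN (by simp [PySem.Set.empty])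
          · exact hcl
      rcases cov with hmem | hvisf
      · exact hnS r c hesc hmem
      · have := (hvc (r, c) false hvisf).mpr hesc
        simp at this
  refine ⟨hiff, ?_⟩
  intro p b hpb
  rw [PySem.Dict.get?_insert] at hpb
  split at hpb
  · rename_i heq
    subst heq
    have hb : b = res := (Option.some.inj hpb).symm
    subst hb
    exact hiff
  · exact hvc p b hpb

lemma pvScanColsA_spec (board : List (List Int)) (h w fuel : Nat)
    (hfuel : (pvIntF board h w).card + 1 ≤ fuel) (r : Nat) (hr : r < h) :
    ∀ cs vis, pvVC board h w vis → (∀ c ∈ cs, c < w) →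
      match pvScanColsA board (h-1) (w-1) fuel r cs vis with
      | some v' => pvVC board h w v' ∧ ∀ c ∈ cs, pvAt0 board r c = true → pvEsc board h w r c
      | none => ∃ c ∈ cs, pvAt0 board r c = true ∧ ¬ pvEsc board h w r c := by
  intro cs
  induction cs with
  | nil =>
    intro vis hvc _
    exact ⟨hvc, by simp⟩
  | cons c cs ih =>
    intro vis hvc hcs
    by_cases hat : pvAt0 board r c = true
    · have hc : c < w := hcs c (by simp)
      obtain ⟨hiff, hvc'⟩ := pvPathExistsA_spec board h w fuel vis hvc hfuel r c hr hc hat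
      rcases hpe : pvPathExistsA board (h-1) (w-1) fuel vis r c with ⟨res, v'⟩
      rw [hpe] at hiff hvc'
      have hred : pvScanColsA board (h-1) (w-1) fuel r (c :: cs) vis =
          (if res then pvScanColsA board (h-1) (w-1) fuel r cs v' else none) := by
        simp only [pvScanColsA]
        rw [if_pos hat, hpe]
      rw [hred]
      cases res
      · rw [if_neg (by simp)]
        exact ⟨c, by simp, hat, fun hesc => absurd (hiff.mpr hesc) (by simp)⟩
      · rw [if_pos rfl]
        have hrest := ih v' hvc' (fun c' hc' => hcs c' (by simp [hc']))
        cases hsc : pvScanColsA board (h-1) (w-1) fuel r cs v' with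
        | none =>
          rw [hsc] at hrest
          obtain ⟨c', hc', hat', hne⟩ := hrest
          exact ⟨c', by simp [hc'], hat', hne⟩
        | some v'' =>
          rw [hsc] at hrest
          obtain ⟨hvc'', hesc⟩ := hrest
          refine ⟨hvc'', ?_⟩
          intro c' hc' hat'
          rcases List.mem_cons.mp hc' with rfl | hc'
          · exact hiff.mp rfl
          · exact hesc c' hc' hat'
    · have hred : pvScanColsA board (h-1) (w-1) fuel r (c :: cs) vis =
          pvScanColsA board (h-1) (w-1) fuel r cs vis := by
        simp only [pvScanColsA]
        rw [if_neg hat]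
      rw [hred]
      have hrest := ih vis hvc (fun c' hc' => hcs c' (by simp [hc']))
      cases hsc : pvScanColsA board (h-1) (w-1) fuel r cs vis with
      | none =>
        rw [hsc] at hrest
        obtain ⟨c', hc', hat', hne⟩ := hrest
        exact ⟨c', by simp [hc'], hat', hne⟩
      | some v' =>
        rw [hsc] at hrest
        obtain ⟨hvc', hesc⟩ := hrest
        refine ⟨hvc', ?_⟩
        intro c' hc' hat'
        rcases List.mem_cons.mp hc' with rfl | hc'
        · exact absurd hat' hat
        · exact hesc c' hc' hat'

lemma pvScanRowsA_spec (board : List (List Int)) (h w fuel : Nat)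
    (hfuel : (pvIntF board h w).card + 1 ≤ fuel) :
    ∀ rs vis, pvVC board h w vis → (∀ r ∈ rs, r < h) →
      (pvScanRowsA board (h-1) (w-1) fuel w rs vis = true ↔
        ∀ r ∈ rs, ∀ c, c < w → pvAt0 board r c = true → pvEsc board h w r c) := by
  intro rs
  induction rs with
  | nil => intro vis _ _; simp [pvScanRowsA]
  | cons r rs ih =>
    intro vis hvc hrs
    have hr : r < h := hrs r (by simp)
    have hcols := pvScanColsA_spec board h w fuel hfuel r hr (List.range w) vis hvc
      (fun c hc => List.mem_range.mp hc)
    have hred : pvScanRowsA board (h-1) (w-1) fuel w (r :: rs) vis =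
        (match pvScanColsA board (h-1) (w-1) fuel r (List.range w) vis with
         | none => false
         | some v' => pvScanRowsA board (h-1) (w-1) fuel w rs v') := rfl
    rw [hred]
    cases hsc : pvScanColsA board (h-1) (w-1) fuel r (List.range w) vis with
    | none =>
      rw [hsc] at hcols
      obtain ⟨c, hc, hat, hne⟩ := hcols
      simp only [List.mem_range] at hc
      constructor
      · intro habs; exact absurd habs (by simp)
      · intro hall; exact absurd (hall r (by simp) c hc hat) hne
    | some v' =>
      rw [hsc] at hcols
      obtain ⟨hvc', hesc⟩ := hcols
      rw [ih v' hvc' (fun r' hr' => hrs r' (by simp [hr']))]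
      constructor
      · intro hall r' hr' c hc hat
        rcases List.mem_cons.mp hr' with rfl | hr'
        · exact hesc c (List.mem_range.mpr hc) hat
        · exact hall r' hr' c hc hat
      · intro hall r' hr' c hc hat
        exact hall r' (by simp [hr']) c hc hat

lemma pvA_char (board : List (List Int)) (hne : board ≠ []) :
    (isLegalBoard board = true ↔
      ∀ r c, r < board.length → c < (board.headD []).length → pvAt0 board r c = true →
        pvEsc board (board.length) ((board.headD []).length) r c) := by
  have hvc0 : pvVC board (board.length) ((board.headD []).length) PySem.Dict.empty := by
    intro p b hpb
    rw [PySem.Dict.get?_empty] at hpb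
    cases hpb
  have hfuel : (pvIntF board (board.length) ((board.headD []).length)).card + 1 ≤
      board.length * (board.headD []).length + 1 := by
    have := pvIntF_card board (board.length) ((board.headD []).length)
    omega
  have hmain := pvScanRowsA_spec board (board.length) ((board.headD []).length)
    (board.length * (board.headD []).length + 1) hfuel (List.range board.length)
    PySem.Dict.empty hvc0 (fun r hr => List.mem_range.mp hr)
  unfold isLegalBoard
  rw [if_neg hne]
  rw [hmain]
  constructor
  · intro hall r c hr hc hat
    exact hall r (List.mem_range.mpr hr) c hc hat
  · intro hall r hr c hc hat
    exact hall r c (List.mem_range.mp hr) hc hat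

-- B-side
lemma pvBStep_facts (board : List (List Int)) (h w : Nat)
    (st : PySem.Set (Nat × Nat) × List (Nat × Nat)) (nr nc : Nat) (ok : Bool) :
    (∀ p, p ∈ (pvBStep board h w st (nr, nc, ok)).1 ↔
       p ∈ st.1 ∨ (p = (nr, nc) ∧ ok = true ∧ nr < h ∧ nc < w ∧ pvAt0 board nr nc = true)) ∧
    (∀ p ∈ st.1, p ∈ (pvBStep board h w st (nr, nc, ok)).1) ∧
    (∀ p ∈ st.2, p ∈ (pvBStep board h w st (nr, nc, ok)).2) ∧
    (∀ p ∈ (pvBStep board h w st (nr, nc, ok)).2, p ∈ st.2 ∨ p ∈ (pvBStep board h w st (nr, nc, ok)).1) ∧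
    (ok = true → nr < h → nc < w → pvAt0 board nr nc = true →
       (nr, nc) ∈ (pvBStep board h w st (nr, nc, ok)).1) ∧
    (st.1.Nodup → (pvBStep board h w st (nr, nc, ok)).1.Nodup) ∧
    (((pvBStep board h w st (nr, nc, ok)).1.length = st.1.length ∧
      (pvBStep board h w st (nr, nc, ok)).2.length = st.2.length) ∨
     ((pvBStep board h w st (nr, nc, ok)).1.length = st.1.length + 1 ∧
      (pvBStep board h w st (nr, nc, ok)).2.length = st.2.length + 1)) ∧
    (∀ p ∈ (pvBStep board h w st (nr, nc, ok)).1, p ∈ st.1 ∨ p ∈ (pvBStep board h w st (nr, nc, ok)).2) := by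
  have hred : pvBStep board h w st (nr, nc, ok) =
      if ok && decide (nr < h) && decide (nc < w) && pvAt0 board nr nc
          && !(PySem.Set.contains st.1 (nr, nc))
      then (PySem.Set.add st.1 (nr, nc), (nr, nc) :: st.2) else st := rfl
  rw [hred]
  by_cases hcond : (ok && decide (nr < h) && decide (nc < w) && pvAt0 board nr nc
      && !(PySem.Set.contains st.1 (nr, nc))) = true
  · rw [if_pos hcond]
    simp only [Bool.and_eq_true, decide_eq_true_eq, Bool.not_eq_true'] at hcond
    obtain ⟨⟨⟨⟨hok, hnr⟩, hnc⟩, hat⟩, hcon⟩ := hcond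
    have hnm : (nr, nc) ∉ st.1 := fun hm => by
      rw [(PySem.Set.contains_iff _ _).mpr hm] at hcon; cases hcon
    have hadd : PySem.Set.add st.1 (nr, nc) = st.1 ++ [(nr, nc)] := PySem.Set.add_of_not_mem hnm
    refine ⟨?_, ?_, ?_, ?_, ?_, ?_, ?_, ?_⟩
    · intro p
      rw [PySem.Set.mem_add]
      constructor
      · rintro (hp | rfl)
        · exact Or.inl hp
        · exact Or.inr ⟨rfl, hok, hnr, hnc, hat⟩
      · rintro (hp | ⟨rfl, _⟩)
        · exact Or.inl hp
        · exact Or.inr rfl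
    · intro p hp; exact (PySem.Set.mem_add _ _ _).mpr (Or.inl hp)
    · intro p hp; exact List.mem_cons_of_mem _ hp
    · intro p hp
      rcases List.mem_cons.mp hp with rfl | hp
      · exact Or.inr ((PySem.Set.mem_add _ _ _).mpr (Or.inr rfl))
      · exact Or.inl hp
    · intro _ _ _ _; exact (PySem.Set.mem_add _ _ _).mpr (Or.inr rfl)
    · intro hn; exact pvNodupAdd st.1 (nr, nc) hn
    · right
      constructor
      · simp [hadd]
      · simp
    · intro p hp
      rcases (PySem.Set.mem_add _ _ _).mp hp with hp | rfl
      · exact Or.inl hp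
      · exact Or.inr (by simp)
  · rw [if_neg hcond]
    have himp : ok = true → nr < h → nc < w → pvAt0 board nr nc = true → (nr, nc) ∈ st.1 := by
      intro hok hnr hnc hat
      by_contra hnm
      apply hcond
      simp [hok, hnr, hnc, hat]
      exact hnm
    refine ⟨?_, fun p hp => hp, fun p hp => hp, fun p hp => Or.inl hp, himp, fun hn => hn,
      Or.inl ⟨rfl, rfl⟩, fun p hp => Or.inl hp⟩
    intro p
    constructor
    · exact Or.inl
    · rintro (hp | ⟨rfl, hok, hnr, hnc, hat⟩)
      · exact hp
      · exact himp hok hnr hnc hat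

lemma pvFloodB_zero (board : List (List Int)) (h w : Nat) (stack : List (Nat × Nat))
    (reached : PySem.Set (Nat × Nat)) : pvFloodB board h w 0 stack reached = reached := rfl

lemma pvFloodB_nil (board : List (List Int)) (h w n : Nat) (reached : PySem.Set (Nat × Nat)) :
    pvFloodB board h w (n+1) [] reached = reached := rfl

lemma pvFloodB_cons (board : List (List Int)) (h w n r c : Nat) (rest : List (Nat × Nat))
    (reached : PySem.Set (Nat × Nat)) :
    pvFloodB board h w (n+1) ((r, c) :: rest) reached =
      pvFloodB board h w n
        ((pvNbrs r c).foldl (pvBStep board h w) (reached, rest)).2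
        ((pvNbrs r c).foldl (pvBStep board h w) (reached, rest)).1 := rfl

lemma pvFloodB_spec (board : List (List Int)) (h w : Nat) :
    ∀ fuel (stack : List (Nat × Nat)) (reached : PySem.Set (Nat × Nat)),
      stack.length + (h * w - reached.length) ≤ fuel →
      (∀ p ∈ stack, p ∈ reached) →
      (∀ p ∈ reached, p.1 < h ∧ p.2 < w ∧ pvAt0 board p.1 p.2 = true) →
      (∀ p ∈ reached, p ∈ stack ∨
         pvClosedAt board h w PySem.Dict.empty (fun a b => (a, b) ∈ reached) p.1 p.2) →
      (∀ p ∈ reached, pvEsc board h w p.1 p.2) →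
      reached.Nodup →
      (∀ p ∈ reached, p ∈ pvFloodB board h w fuel stack reached) ∧
      (∀ p ∈ pvFloodB board h w fuel stack reached, pvEsc board h w p.1 p.2) ∧
      (∀ p ∈ pvFloodB board h w fuel stack reached,
         pvClosedAt board h w PySem.Dict.empty
           (fun a b => (a, b) ∈ pvFloodB board h w fuel stack reached) p.1 p.2) := by
  intro fuel
  induction fuel with
  | zero =>
    intro stack reached hfuel h1 h2 h3 h4 hnd
    cases stack with
    | nil =>
      rw [pvFloodB_zero]
      exact ⟨fun p hp => hp, h4, fun p hp => (h3 p hp).resolve_left (by simp)⟩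
    | cons a t =>
      exfalso
      simp only [List.length_cons] at hfuel
      omega
  | succ n ih =>
    intro stack reached hfuel h1 h2 h3 h4 hnd
    cases stack with
    | nil =>
      rw [pvFloodB_nil]
      exact ⟨fun p hp => hp, h4, fun p hp => (h3 p hp).resolve_left (by simp)⟩
    | cons p0 rest =>
      rcases p0 with ⟨r, c⟩
      have hrcR : (r, c) ∈ reached := h1 (r, c) (by simp)
      have hEsc0 : pvEsc board h w r c := h4 (r, c) hrcR
      rw [pvFloodB_cons]
      simp only [pvNbrs, List.foldl_cons, List.foldl_nil]
      set st1 := pvBStep board h w (reached, rest) (r - 1, c, decide (1 ≤ r)) with hst1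
      set st2 := pvBStep board h w st1 (r + 1, c, true) with hst2
      set st3 := pvBStep board h w st2 (r, c - 1, decide (1 ≤ c)) with hst3
      set st4 := pvBStep board h w st3 (r, c + 1, true) with hst4
      have F1 := pvBStep_facts board h w (reached, rest) (r - 1) c (decide (1 ≤ r))
      rw [← hst1] at F1
      have F2 := pvBStep_facts board h w st1 (r + 1) c true
      rw [← hst2] at F2
      have F3 := pvBStep_facts board h w st2 r (c - 1) (decide (1 ≤ c))
      rw [← hst3] at F3
      have F4 := pvBStep_facts board h w st3 r (c + 1) true
      rw [← hst4] at F4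
      obtain ⟨c1a, c2a, c3a, c4a, c5a, c6a, c7a, c8a⟩ := F1
      obtain ⟨c1b, c2b, c3b, c4b, c5b, c6b, c7b, c8b⟩ := F2
      obtain ⟨c1c, c2c, c3c, c4c, c5c, c6c, c7c, c8c⟩ := F3
      obtain ⟨c1d, c2d, c3d, c4d, c5d, c6d, c7d, c8d⟩ := F4
      have M : ∀ p ∈ reached, p ∈ st4.1 := fun p hp => c2d _ (c2c _ (c2b _ (c2a _ hp)))
      have SR : ∀ p ∈ rest, p ∈ st4.2 := fun p hp => c3d _ (c3c _ (c3b _ (c3a _ hp)))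
      have G4 : ∀ p ∈ st4.1, p.1 < h ∧ p.2 < w ∧ pvAt0 board p.1 p.2 = true ∧
          pvEsc board h w p.1 p.2 := by
        intro p hp
        rcases (c1d p).mp hp with hp3 | ⟨rfl, _, hb1, hb2, hb3⟩
        · rcases (c1c p).mp hp3 with hp2 | ⟨rfl, hok, hb1, hb2, hb3⟩
          · rcases (c1b p).mp hp2 with hp1 | ⟨rfl, _, hb1, hb2, hb3⟩
            · rcases (c1a p).mp hp1 with hp0 | ⟨rfl, hok, hb1, hb2, hb3⟩
              · obtain ⟨x1, x2, x3⟩ := h2 p hp0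
                exact ⟨x1, x2, x3, h4 p hp0⟩
              · have hr1 : 1 ≤ r := of_decide_eq_true hok
                exact ⟨hb1, hb2, hb3,
                  pvEsc.down (r-1) c hb1 hb2 hb3 (by rw [Nat.sub_add_cancel hr1]; exact hEsc0)⟩
            · exact ⟨hb1, hb2, hb3,
                pvEsc.up (r+1) c hb1 hb2 hb3 (by omega) (by simpa using hEsc0)⟩
          · have hc1 : 1 ≤ c := of_decide_eq_true hok
            exact ⟨hb1, hb2, hb3,
              pvEsc.right r (c-1) hb1 hb2 hb3 (by rw [Nat.sub_add_cancel hc1]; exact hEsc0)⟩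
        · exact ⟨hb1, hb2, hb3,
            pvEsc.left r (c+1) hb1 hb2 hb3 (by omega) (by simpa using hEsc0)⟩
      have CL0 : pvClosedAt board h w PySem.Dict.empty (fun a b => (a, b) ∈ st4.1) r c := by
        refine ⟨?_, ?_, ?_, ?_⟩
        · intro hr1 hb1 hb2 hat'
          exact Or.inl (c2d _ (c2c _ (c2b _ (c5a (by simp [hr1]) hb1 hb2 hat'))))
        · intro hb1 hb2 hat'
          exact Or.inl (c2d _ (c2c _ (c5b rfl hb1 hb2 hat')))
        · intro hc1 hb0 hb1 hat'
          exact Or.inl (c2d _ (c5c (by simp [hc1]) hb0 hb1 hat'))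
        · intro hb0 hb1 hat'
          exact Or.inl (c5d rfl hb0 hb1 hat')
      have h1' : ∀ p ∈ st4.2, p ∈ st4.1 := by
        intro p hp
        rcases c4d p hp with hp3 | hm
        · rcases c4c p hp3 with hp2 | hm
          · rcases c4b p hp2 with hp1 | hm
            · rcases c4a p hp1 with hp0 | hm
              · exact M p (h1 p (by simp [hp0]))
              · exact c2d _ (c2c _ (c2b _ hm))
            · exact c2d _ (c2c _ hm)
          · exact c2d _ hm
        · exact hm
      have h2' : ∀ p ∈ st4.1, p.1 < h ∧ p.2 < w ∧ pvAt0 board p.1 p.2 = true :=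
        fun p hp => ⟨(G4 p hp).1, (G4 p hp).2.1, (G4 p hp).2.2.1⟩
      have h4' : ∀ p ∈ st4.1, pvEsc board h w p.1 p.2 := fun p hp => (G4 p hp).2.2.2
      have h3' : ∀ p ∈ st4.1, p ∈ st4.2 ∨
          pvClosedAt board h w PySem.Dict.empty (fun a b => (a, b) ∈ st4.1) p.1 p.2 := by
        intro p hp
        rcases c8d p hp with hp3 | hstk
        · rcases c8c p hp3 with hp2 | hstk
          · rcases c8b p hp2 with hp1 | hstk
            · rcases c8a p hp1 with hp0 | hstk
              · rcases h3 p hp0 with hstk0 | hclosed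
                · rcases List.mem_cons.mp hstk0 with heq | hrest
                  · rw [heq]; exact Or.inr CL0
                  · exact Or.inl (SR p hrest)
                · exact Or.inr (pvClosedAt_mono (fun a b hab => M (a, b) hab) hclosed)
              · exact Or.inl (c3d _ (c3c _ (c3b _ hstk)))
            · exact Or.inl (c3d _ (c3c _ hstk))
          · exact Or.inl (c3d _ hstk)
        · exact Or.inl hstk
      have hnd' : st4.1.Nodup := c6d (c6c (c6b (c6a hnd)))
      have hcnt : st4.1.length ≤ h * w :=
        pvCardBound h w st4.1 hnd' (fun p hp => ⟨(h2' p hp).1, (h2' p hp).2.1⟩)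
      have hfuel' : st4.2.length + (h * w - st4.1.length) ≤ n := by
        simp only [List.length_cons] at hfuel
        generalize hHW : h * w = HW at hfuel hcnt ⊢
        dsimp only at c7a
        rcases c7a with ⟨e1, e2⟩ | ⟨e1, e2⟩ <;> rcases c7b with ⟨e3, e4⟩ | ⟨e3, e4⟩ <;>
          rcases c7c with ⟨e5, e6⟩ | ⟨e5, e6⟩ <;> rcases c7d with ⟨e7, e8⟩ | ⟨e7, e8⟩ <;>
          omega
      obtain ⟨C1, C2, C3⟩ := ih st4.2 st4.1 hfuel' h1' h2' h3' h4' hnd'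
      exact ⟨fun p hp => C1 p (M p hp), C2, C3⟩

lemma pvSources_spec (board : List (List Int)) (h w : Nat) :
    ∀ (L : List (Nat × Nat)) (st : PySem.Set (Nat × Nat) × List (Nat × Nat)),
      (∀ p, p ∈ (L.foldl (pvAddSourceB board h w) st).1 ↔ p ∈ st.1 ∨
        (p ∈ L ∧ (p.1 = 0 ∨ p.2 = 0 ∨ p.1 = h-1 ∨ p.2 = w-1) ∧ pvAt0 board p.1 p.2 = true)) ∧
      (∀ p, p ∈ (L.foldl (pvAddSourceB board h w) st).2 ↔ p ∈ st.2 ∨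
        (p ∈ L ∧ (p.1 = 0 ∨ p.2 = 0 ∨ p.1 = h-1 ∨ p.2 = w-1) ∧ pvAt0 board p.1 p.2 = true)) ∧
      ((L.foldl (pvAddSourceB board h w) st).2.length ≤ st.2.length + L.length) ∧
      (st.1.Nodup → (L.foldl (pvAddSourceB board h w) st).1.Nodup) := by
  intro L
  induction L with
  | nil =>
    intro st
    exact ⟨fun p => by simp, fun p => by simp, by simp, fun hn => hn⟩
  | cons q L ih =>
    intro st
    rw [List.foldl_cons]
    obtain ⟨i1, i2, i3, i4⟩ := ih (pvAddSourceB board h w st q)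
    have hCq := fun (hb : q.1 = 0 ∨ q.2 = 0 ∨ q.1 = h-1 ∨ q.2 = w-1)
        (ha : pvAt0 board q.1 q.2 = true) => And.intro hb ha
    have step1 : ∀ p, p ∈ (pvAddSourceB board h w st q).1 ↔ p ∈ st.1 ∨
        (p = q ∧ (q.1 = 0 ∨ q.2 = 0 ∨ q.1 = h-1 ∨ q.2 = w-1) ∧ pvAt0 board q.1 q.2 = true) := by
      intro p
      unfold pvAddSourceB
      split
      · rename_i hcond
        rw [PySem.Set.mem_add]
        constructor
        · rintro (hp | rfl)
          · exact Or.inl hp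
          · exact Or.inr ⟨rfl, hcond.1, hcond.2⟩
        · rintro (hp | ⟨rfl, _, _⟩)
          · exact Or.inl hp
          · exact Or.inr rfl
      · rename_i hcond
        constructor
        · exact Or.inl
        · rintro (hp | ⟨rfl, hb, ha⟩)
          · exact hp
          · exact absurd ⟨hb, ha⟩ hcond
    have step2 : ∀ p, p ∈ (pvAddSourceB board h w st q).2 ↔ p ∈ st.2 ∨
        (p = q ∧ (q.1 = 0 ∨ q.2 = 0 ∨ q.1 = h-1 ∨ q.2 = w-1) ∧ pvAt0 board q.1 q.2 = true) := by
      intro p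
      unfold pvAddSourceB
      split
      · rename_i hcond
        constructor
        · intro hp
          rcases List.mem_cons.mp hp with rfl | hp
          · exact Or.inr ⟨rfl, hcond.1, hcond.2⟩
          · exact Or.inl hp
        · rintro (hp | ⟨rfl, _, _⟩)
          · exact List.mem_cons_of_mem _ hp
          · exact List.mem_cons_self
      · rename_i hcond
        constructor
        · exact Or.inl
        · rintro (hp | ⟨rfl, hb, ha⟩)
          · exact hp
          · exact absurd ⟨hb, ha⟩ hcond
    have step3 : (pvAddSourceB board h w st q).2.length ≤ st.2.length + 1 := by
      unfold pvAddSourceB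
      split
      · simp
      · simp
    have step4 : st.1.Nodup → (pvAddSourceB board h w st q).1.Nodup := by
      intro hn
      unfold pvAddSourceB
      split
      · exact pvNodupAdd st.1 q hn
      · exact hn
    refine ⟨?_, ?_, ?_, fun hn => i4 (step4 hn)⟩
    · intro p
      rw [i1 p, step1 p]
      constructor
      · rintro ((hp | ⟨rfl, hb, ha⟩) | ⟨hm, hb, ha⟩)
        · exact Or.inl hp
        · exact Or.inr ⟨by simp, hb, ha⟩
        · exact Or.inr ⟨by simp [hm], hb, ha⟩
      · rintro (hp | ⟨hm, hb, ha⟩)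
        · exact Or.inl (Or.inl hp)
        · rcases List.mem_cons.mp hm with rfl | hm
          · exact Or.inl (Or.inr ⟨rfl, hb, ha⟩)
          · exact Or.inr ⟨hm, hb, ha⟩
    · intro p
      rw [i2 p, step2 p]
      constructor
      · rintro ((hp | ⟨rfl, hb, ha⟩) | ⟨hm, hb, ha⟩)
        · exact Or.inl hp
        · exact Or.inr ⟨by simp, hb, ha⟩
        · exact Or.inr ⟨by simp [hm], hb, ha⟩
      · rintro (hp | ⟨hm, hb, ha⟩)
        · exact Or.inl (Or.inl hp)
        · rcases List.mem_cons.mp hm with rfl | hm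
          · exact Or.inl (Or.inr ⟨rfl, hb, ha⟩)
          · exact Or.inr ⟨hm, hb, ha⟩
    · have := i3
      simp only [List.length_cons]
      omega

lemma pvCells_mem (h w : Nat) (p : Nat × Nat) :
    p ∈ pvCells h w ↔ p.1 < h ∧ p.2 < w := by
  rcases p with ⟨r, c⟩
  simp [pvCells, List.mem_flatMap, List.mem_map, List.mem_range]

lemma pvCells_length (h w : Nat) : (pvCells h w).length = h * w := by
  simp [pvCells]

lemma pvB_char (board : List (List Int)) (hne : board ≠ []) :
    (isLegalBoard_alt board = true ↔
      ∀ r c, r < board.length → c < (board.headD []).length → pvAt0 board r c = true →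
        pvEsc board (board.length) ((board.headD []).length) r c) := by
  set H := board.length with hH
  set W := (board.headD []).length with hW
  have hunf : isLegalBoard_alt board =
      (pvCells H W).all (fun p => !(pvAt0 board p.1 p.2) ||
        PySem.Set.contains
          (pvFloodB board H W (2*H*W+1)
            ((pvCells H W).foldl (pvAddSourceB board H W) (PySem.Set.empty, [])).2
            ((pvCells H W).foldl (pvAddSourceB board H W) (PySem.Set.empty, [])).1) p) := by
    unfold isLegalBoard_alt
    rw [if_neg hne]
  rw [hunf]
  obtain ⟨s1, s2, s3, s4⟩ := pvSources_spec board H W (pvCells H W) (PySem.Set.empty, [])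
  set ST := (pvCells H W).foldl (pvAddSourceB board H W) (PySem.Set.empty, []) with hST
  have hs1 : ∀ p, p ∈ ST.1 ↔ (p.1 < H ∧ p.2 < W) ∧
      (p.1 = 0 ∨ p.2 = 0 ∨ p.1 = H-1 ∨ p.2 = W-1) ∧ pvAt0 board p.1 p.2 = true := by
    intro p
    rw [s1 p]
    simp only [PySem.Set.empty]
    constructor
    · rintro (hp | ⟨hm, hb, ha⟩)
      · simp at hp
      · exact ⟨(pvCells_mem H W p).mp hm, hb, ha⟩
    · rintro ⟨hm, hb, ha⟩
      exact Or.inr ⟨(pvCells_mem H W p).mpr hm, hb, ha⟩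
  have hs2 : ∀ p, p ∈ ST.2 ↔ (p.1 < H ∧ p.2 < W) ∧
      (p.1 = 0 ∨ p.2 = 0 ∨ p.1 = H-1 ∨ p.2 = W-1) ∧ pvAt0 board p.1 p.2 = true := by
    intro p
    rw [s2 p]
    constructor
    · rintro (hp | ⟨hm, hb, ha⟩)
      · simp at hp
      · exact ⟨(pvCells_mem H W p).mp hm, hb, ha⟩
    · rintro ⟨hm, hb, ha⟩
      exact Or.inr ⟨(pvCells_mem H W p).mpr hm, hb, ha⟩
  have hnd0 : ST.1.Nodup := s4 (by simp [PySem.Set.empty])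
  have hlen : ST.2.length ≤ H * W := by
    have := s3
    rw [pvCells_length] at this
    simpa using this
  have hfuelB : ST.2.length + (H * W - ST.1.length) ≤ 2*H*W+1 := by
    have hx : H * W - ST.1.length ≤ H * W := Nat.sub_le _ _
    have hy : 2 * H * W = H * W + H * W := by ring
    omega
  obtain ⟨C1, C2, C3⟩ := pvFloodB_spec board H W (2*H*W+1) ST.2 ST.1
    hfuelB
    (fun p hp => (hs1 p).mpr ((hs2 p).mp hp))
    (fun p hp => ⟨((hs1 p).mp hp).1.1, ((hs1 p).mp hp).1.2, ((hs1 p).mp hp).2.2⟩)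
    (fun p hp => Or.inl ((hs2 p).mpr ((hs1 p).mp hp)))
    (fun p hp => pvEsc.base p.1 p.2 ((hs1 p).mp hp).1.1 ((hs1 p).mp hp).1.2
      ((hs1 p).mp hp).2.2 ((hs1 p).mp hp).2.1)
    hnd0
  set R := pvFloodB board H W (2*H*W+1) ST.2 ST.1 with hR
  have hcomp : ∀ r c, pvEsc board H W r c → (r, c) ∈ R := by
    intro r c he
    induction he with
    | base r c hr hc hat hb => exact C1 (r, c) ((hs1 (r, c)).mpr ⟨⟨hr, hc⟩, hb, hat⟩)
    | up r c hr hc hat hr1 hsub ih =>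
      obtain ⟨_, cdown, _, _⟩ := C3 (r-1, c) ih
      have hrw : r - 1 + 1 = r := Nat.sub_add_cancel hr1
      rw [hrw] at cdown
      rcases cdown hr hc hat with hm | hfalse
      · exact hm
      · rw [PySem.Dict.get?_empty] at hfalse; cases hfalse
    | down r c hr hc hat hsub ih =>
      obtain ⟨cup, _, _, _⟩ := C3 (r+1, c) ih
      have hrw : r + 1 - 1 = r := by omega
      rw [hrw] at cup
      rcases cup (by omega) hr hc hat with hm | hfalse
      · exact hm
      · rw [PySem.Dict.get?_empty] at hfalse; cases hfalse
    | left r c hr hc hat hc1 hsub ih =>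
      obtain ⟨_, _, _, cright⟩ := C3 (r, c-1) ih
      have hrw : c - 1 + 1 = c := Nat.sub_add_cancel hc1
      rw [hrw] at cright
      rcases cright hr hc hat with hm | hfalse
      · exact hm
      · rw [PySem.Dict.get?_empty] at hfalse; cases hfalse
    | right r c hr hc hat hsub ih =>
      obtain ⟨_, _, cleft, _⟩ := C3 (r, c+1) ih
      have hrw : c + 1 - 1 = c := by omega
      rw [hrw] at cleft
      rcases cleft (by omega) hr hc hat with hm | hfalse
      · exact hm
      · rw [PySem.Dict.get?_empty] at hfalse; cases hfalse
  rw [List.all_eq_true]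
  constructor
  · intro hall r c hr hc hat
    have hx := hall (r, c) ((pvCells_mem H W (r, c)).mpr ⟨hr, hc⟩)
    simp only [Bool.or_eq_true, Bool.not_eq_true'] at hx
    rcases hx with hf | hm
    · exact absurd hat (by simp [hf])
    · exact C2 (r, c) ((PySem.Set.contains_iff _ _).mp hm)
  · intro hall p hp
    obtain ⟨hr, hc⟩ := (pvCells_mem H W p).mp hp
    by_cases hat : pvAt0 board p.1 p.2 = true
    · have hm := hcomp p.1 p.2 (hall p.1 p.2 hr hc hat)
      have hcont : PySem.Set.contains R p = true :=
        (PySem.Set.contains_iff _ _).mpr (by simpa using hm)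
      simp only [Bool.or_eq_true, Bool.not_eq_true']
      exact Or.inr hcont
    · have hf : pvAt0 board p.1 p.2 = false := by
        cases hx : pvAt0 board p.1 p.2
        · rfl
        · exact absurd hx hat
      simp [hf]

-- ===== VERDICT (by name: the statement is the Claim_ definition above) =====
theorem isLegalBoard_spec : Claim_equal_isLegalBoard := by
  intro board _dom _pre
  unfold Spec_isLegalBoard
  by_cases hne : board = []
  · subst hne; rfl
  · have hA := pvA_char board hne
    have hB := pvB_char board hne
    cases hA' : isLegalBoard board <;> cases hB' : isLegalBoard_alt board <;> try rfl
    · rw [hA'] at hA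
      exact hA.mpr (hB.mp hB')
    · rw [hA'] at hA
      exact absurd (hB.mpr (hA.mp rfl)) (by simp [hB'])
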